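-- pv_equiv track=rewrite | github.com/gsanchz/GFG_POTD | 240106_Techfest_and_the_Queue.py | sumOfPowers
-- ===== SOURCE A (Python) =====
-- def sumOfPowers(a : int, b : int) -> int:
--     def sqrt_int(number): #To avoid OverflowError with large ints when sqrt
--
--         if number == 0 or number == 1:
--             return number
--
--         start, end = 0, number
--         while start <= end:
--             mid = (start + end) // 2
--             sqrt_mid = mid * mid
--
--             if sqrt_mid == number:
--                 return mid
--             elif sqrt_mid < number:
--                 start = mid + 1
--                 ans = mid
--             else:
--                 end = mid - 1
--
--         return ans
--
--     def n_primes(m):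
--         count = 0
--         for i in range(2,sqrt_int(m)+1):
--             while m%i == 0:
--                 count += 1
--                 m = m//i
--         if m > 1: #m is a prime
--             count += 1
--         return count
--
--     prod = 1
--     for j in range(a,b+1):
--         prod *= j
--     return n_primes(prod)
-- ===== SOURCE B (Python) =====
-- def sumOfPowers(a: int, b: int) -> int:
--     # Omega is completely additive: Omega(prod j) = sum Omega(|j|), unless the
--     # product contains 0 (then the product is 0, which has no prime factors).
--     if a <= 0 <= b:
--         return 0
--     total = 0
--     for j in range(a, b + 1):
--         n = abs(j)
--         i = 2
--         while i * i <= n: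
--             while n % i == 0:
--                 total += 1
--                 n //= i
--             i += 1
--         if n > 1:
--             total += 1
--     return total
-- ===== Notes on version B (the rewrite author's own statement) =====
-- stated objective: alternative
-- what changed: A multiplies the whole range into one huge product and trial-divides that product up to a binary-searched integer square root; B never forms the product: it trial-divides each factor |j| separately and sums the per-factor prime-factor counts (Omega is completely additive), returning 0 directly when the range contains 0.
import Mathlib
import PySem

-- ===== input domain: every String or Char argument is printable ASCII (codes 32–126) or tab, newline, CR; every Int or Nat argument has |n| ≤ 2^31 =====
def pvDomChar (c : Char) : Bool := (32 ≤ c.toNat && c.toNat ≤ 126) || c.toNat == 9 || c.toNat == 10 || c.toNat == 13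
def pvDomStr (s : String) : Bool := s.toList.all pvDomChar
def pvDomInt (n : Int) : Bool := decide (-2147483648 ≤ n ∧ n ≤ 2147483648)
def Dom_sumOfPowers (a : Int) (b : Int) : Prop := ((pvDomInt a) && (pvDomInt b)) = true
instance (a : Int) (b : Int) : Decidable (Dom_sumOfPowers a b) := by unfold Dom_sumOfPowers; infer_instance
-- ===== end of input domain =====

-- B replaces A's 'multiply the whole range and trial-divide the huge product up to its
-- binary-searched integer square root' by one trial division per factor j, summing the
-- per-factor prime-factor counts (Ω is completely additive), so no big product is formed.

-- ===== PORT A =====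
-- Python's binary-search sqrt loop; `ans` starts unbound in Python (it is always assigned
-- before the final return when number ≥ 2; for number < 0 Python raises UnboundLocalError,
-- outside Pre_, where this port returns the placeholder 0). Fuel bounds the iterations.
def pvSqrtLoop (number : Int) : Int → Int → Int → Nat → Int
  | _, _, ans, 0 => ans
  | start, end_, ans, fuel+1 =>
    if start ≤ end_ then
      let mid := PySem.Int.floordiv (start + end_) 2
      if mid * mid = number then mid
      else if mid * mid < number then pvSqrtLoop number (mid+1) end_ mid fuel
      else pvSqrtLoop number start (mid-1) ans fuel
    else ans

def pvSqrtInt (number : Int) : Int :=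
  if number = 0 ∨ number = 1 then number
  else pvSqrtLoop number 0 number 0 (number.natAbs + 2)

-- inner `while m % i == 0: count += 1; m //= i` (fuel m.natAbs+1 is enough for 1 ≤ m, 2 ≤ i)
def pvStripA (i : Int) : Int → Int → Nat → Int × Int
  | count, m, 0 => (count, m)
  | count, m, fuel+1 =>
    if PySem.Int.mod m i = 0 then pvStripA i (count+1) (PySem.Int.floordiv m i) fuel
    else (count, m)

def pvNPrimes (m : Int) : Int :=
  let s := pvSqrtInt m
  let st := (PySem.List.pyRange 2 (s+1) 1).foldl
    (fun (st : Int × Int) i => pvStripA i st.1 st.2 (st.2.natAbs + 1)) (0, m)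
  if st.2 > 1 then st.1 + 1 else st.1

def sumOfPowers (a : Int) (b : Int) : Int :=
  let prod := (PySem.List.pyRange a (b+1) 1).foldl (fun p j => p * j) 1
  pvNPrimes prod

-- ===== PORT B =====
-- inner `while n % i == 0: total += 1; n //= i`
def pvStripB (i : Int) : Int → Int → Nat → Int × Int
  | total, n, 0 => (total, n)
  | total, n, fuel+1 =>
    if PySem.Int.mod n i = 0 then pvStripB i (total+1) (PySem.Int.floordiv n i) fuel
    else (total, n)

-- `while i*i <= n: … i += 1` then `if n > 1: total += 1` (fuel n.natAbs+2 is enough)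
def pvOmegaLoop : Int → Int → Int → Nat → Int
  | total, _, _, 0 => total
  | total, n, i, fuel+1 =>
    if i * i ≤ n then
      let st := pvStripB i total n (n.natAbs + 1)
      pvOmegaLoop st.1 st.2 (i+1) fuel
    else if n > 1 then total + 1 else total

def sumOfPowers_alt (a : Int) (b : Int) : Int :=
  if a ≤ 0 ∧ 0 ≤ b then 0
  else (PySem.List.pyRange a (b+1) 1).foldl
    (fun total j => pvOmegaLoop total |j| 2 (j.natAbs + 2)) 0

-- ===== PRECONDITION & SPEC =====
-- Pre_ excludes exactly the inputs where the product a·…·b is negative (a nonempty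
-- all-negative range with an odd number of factors): there Python's sqrt_int skips its
-- loop and raises UnboundLocalError.  A returns on every input Pre_ admits.
def Pre_sumOfPowers (a : Int) (b : Int) : Prop := ¬ (a ≤ b ∧ b < 0 ∧ (b - a) % 2 = 0)
instance (a : Int) (b : Int) : Decidable (Pre_sumOfPowers a b) := by unfold Pre_sumOfPowers; infer_instance
def pvWitness_sumOfPowers : Int × Int := (1, 4)

def Spec_sumOfPowers (a : Int) (b : Int) (out : Int) : Prop := out = sumOfPowers_alt a b
instance (a : Int) (b : Int) (out : Int) : Decidable (Spec_sumOfPowers a b out) := by unfold Spec_sumOfPowers; infer_instance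

-- ===== CLAIM (what is proved, stated in full; the proofs are below) =====
def Claim_equal_sumOfPowers : Prop := ∀ (a : Int) (b : Int), Dom_sumOfPowers a b → Pre_sumOfPowers a b → Spec_sumOfPowers a b (sumOfPowers a b)

-- ===== LEMMAS AND PROOFS =====

-- Ω: number of prime factors with multiplicity
def pvOmega (n : ℕ) : ℕ := (Nat.primeFactorsList n).length

lemma pvOmega_mul {a b : ℕ} (ha : a ≠ 0) (hb : b ≠ 0) :
    pvOmega (a * b) = pvOmega a + pvOmega b := by
  unfold pvOmega
  rw [(Nat.perm_primeFactorsList_mul ha hb).length_eq, List.length_append]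

lemma pvOmega_prime {p : ℕ} (hp : p.Prime) : pvOmega p = 1 := by
  unfold pvOmega; rw [Nat.primeFactorsList_prime hp]; rfl

lemma pvOmega_prime_pow {p : ℕ} (hp : p.Prime) (k : ℕ) : pvOmega (p ^ k) = k := by
  induction k with
  | zero => simp [pvOmega, Nat.primeFactorsList_one]
  | succ n ih =>
    rw [pow_succ, pvOmega_mul (pow_ne_zero n hp.ne_zero) hp.ne_zero, ih, pvOmega_prime hp]

lemma pv_prime_of_sq_factors (q : ℕ) (h2 : 2 ≤ q)
    (H : ∀ p : ℕ, p.Prime → p ∣ q → q < p * p) : q.Prime := by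
  by_contra hq
  have hp : (q.minFac).Prime := Nat.minFac_prime (by omega)
  obtain ⟨r, hr⟩ := Nat.minFac_dvd q
  have hr1 : r ≠ 1 := by rintro rfl; rw [Nat.mul_one] at hr; exact hq (hr ▸ hp)
  have hr0 : r ≠ 0 := by rintro rfl; omega
  have hrdvd : r ∣ q := by rw [hr]; exact dvd_mul_left r q.minFac
  have hmr : q.minFac ≤ r := Nat.minFac_le_of_dvd (by omega) hrdvd
  have hlt := H q.minFac hp (Nat.minFac_dvd q)
  nlinarith [hp.two_le]

-- binary-search sqrt correctness
lemma pvSqrtLoop_spec (number : Int) (hn : 2 ≤ number) :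
    ∀ (fuel : Nat) (start end_ ans : Int),
    0 ≤ start →
    (∀ k : Int, 0 ≤ k → k * k ≤ number → k ≤ end_) →
    (start = 0 ∨ (ans = start - 1 ∧ 0 ≤ ans ∧ ans * ans < number)) →
    (end_ + 1 - start).toNat < fuel →
    (let r := pvSqrtLoop number start end_ ans fuel;
     0 ≤ r ∧ r * r ≤ number ∧ number < (r+1) * (r+1)) := by
  intro fuel
  induction fuel with
  | zero => intro start end_ ans _ _ _ hf; omega
  | succ f ih =>
    intro start end_ ans h0 hub hans hf
    simp only [pvSqrtLoop]
    by_cases hle : start ≤ end_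
    · obtain ⟨hm1, hm2⟩ := PySem.Int.floordiv_two_mid_bounds hle
      set mid := PySem.Int.floordiv (start + end_) 2 with hmid
      rw [if_pos hle]
      by_cases heq : mid * mid = number
      · rw [if_pos heq]
        refine ⟨by omega, le_of_eq heq, ?_⟩
        nlinarith
      · rw [if_neg heq]
        by_cases hlt : mid * mid < number
        · rw [if_pos hlt]
          exact ih (mid+1) end_ mid (by omega) hub (Or.inr ⟨by ring, by omega, hlt⟩) (by omega)
        · rw [if_neg hlt]
          have hgt : number < mid * mid := by omega
          refine ih start (mid-1) ans h0 ?_ hans (by omega)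
          intro k hk0 hkle
          by_contra hk
          have hmk : mid ≤ k := by omega
          have : mid * mid ≤ k * k := by nlinarith
          omega
    · rw [if_neg hle]
      rcases hans with h | ⟨hae, ha0, halt⟩
      · exfalso
        have := hub 0 le_rfl (by omega)
        omega
      · refine ⟨ha0, le_of_lt halt, ?_⟩
        by_contra hcon
        have h1 : (ans + 1) * (ans + 1) ≤ number := by omega
        have := hub (ans + 1) (by omega) h1
        omega

lemma pvSqrtInt_eq (m : Int) (hm : 0 ≤ m) : pvSqrtInt m = (Nat.sqrt m.toNat : Int) := by
  by_cases h0 : m = 0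
  · subst h0; simp [pvSqrtInt]
  by_cases h1 : m = 1
  · subst h1; simp [pvSqrtInt]
  have hm2 : 2 ≤ m := by omega
  have hspec := pvSqrtLoop_spec m hm2 (m.natAbs + 2) 0 m 0 le_rfl
    (by intro k hk0 hkk; nlinarith)
    (Or.inl rfl) (by omega)
  simp only [pvSqrtInt, h0, h1, or_self, if_false]
  set r := pvSqrtLoop m 0 m 0 (m.natAbs + 2) with hr
  obtain ⟨hr0, hrle, hrlt⟩ := hspec
  have h1n : r.toNat ^ 2 ≤ m.toNat := by
    rw [pow_two]
    zify [Int.toNat_of_nonneg hr0, Int.toNat_of_nonneg hm]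
    exact hrle
  have h2n : m.toNat < (r.toNat + 1) ^ 2 := by
    rw [pow_two]
    zify [Int.toNat_of_nonneg hr0, Int.toNat_of_nonneg hm]
    exact hrlt
  have hs1 : r.toNat ≤ Nat.sqrt m.toNat := Nat.le_sqrt'.2 h1n
  have hs2 : Nat.sqrt m.toNat < r.toNat + 1 := Nat.sqrt_lt'.2 h2n
  omega

-- strip loop: removes all factors i
lemma pvStripA_spec : ∀ (fuel : Nat) (i count m : Int), 2 ≤ i → 1 ≤ m → m.natAbs < fuel →
    ∃ (k : ℕ) (m' : Int), pvStripA i count m fuel = (count + (k : Int), m') ∧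
      m = i ^ k * m' ∧ 1 ≤ m' ∧ ¬ (i ∣ m') := by
  intro fuel
  induction fuel with
  | zero => intro i count m _ _ hf; omega
  | succ f ih =>
    intro i count m hi hm hf
    simp only [pvStripA]
    by_cases hmod : PySem.Int.mod m i = 0
    · simp only [hmod, if_true]
      have hdvd : i ∣ m := (PySem.Int.mod_eq_zero_iff_dvd m i).1 hmod
      obtain ⟨d, hd⟩ := hdvd
      have hdiv : PySem.Int.floordiv m i = d := by
        rw [PySem.Int.floordiv_eq_ediv_of_pos (by omega), hd,
          Int.mul_ediv_cancel_left _ (by omega : i ≠ 0)]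
      have hd1 : 1 ≤ d := by nlinarith
      have hdm : d < m := by nlinarith
      obtain ⟨k, m', heq, hfact, hm', hnd⟩ := ih i (count + 1) d hi hd1 (by omega)
      refine ⟨k + 1, m', ?_, ?_, hm', hnd⟩
      · rw [hdiv, heq]; push_cast; ring_nf
      · rw [hd, hfact]; ring
    · simp only [hmod, if_false]
      refine ⟨0, m, by norm_num, by ring, hm, ?_⟩
      intro hdvd
      exact hmod ((PySem.Int.mod_eq_zero_iff_dvd m i).2 hdvd)

lemma pvStripB_eq_A (i : Int) : ∀ (fuel : Nat) (t n : Int),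
    pvStripB i t n fuel = pvStripA i t n fuel := by
  intro fuel
  induction fuel with
  | zero => intro t n; rfl
  | succ f ih =>
    intro t n
    simp only [pvStripA, pvStripB]
    split
    · exact ih _ _
    · rfl

-- one step of trial division, Ω-accounting version
lemma pvStripA_omega (i count m : Int) (fuel : Nat) (hi : 2 ≤ i) (hm : 1 ≤ m)
    (hfuel : m.natAbs < fuel)
    (H : ∀ p : ℕ, p.Prime → (p : Int) ∣ m → i ≤ (p : Int)) :
    (pvStripA i count m fuel).1 + (pvOmega (pvStripA i count m fuel).2.natAbs : Int)
        = count + (pvOmega m.natAbs : Int) ∧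
    1 ≤ (pvStripA i count m fuel).2 ∧ (pvStripA i count m fuel).2 ≤ m ∧
    (∀ p : ℕ, p.Prime → (p : Int) ∣ (pvStripA i count m fuel).2 → i + 1 ≤ (p : Int)) := by
  obtain ⟨k, m', heq, hfact, hm', hnd⟩ := pvStripA_spec fuel i count m hi hm hfuel
  by_cases hpr : (i.natAbs).Prime
  · -- i is prime: the loop strips i^k and Ω drops by k
    have hiabs : (i.natAbs : Int) = i := Int.natAbs_of_nonneg (by omega)
    have hmabs : m.natAbs = i.natAbs ^ k * m'.natAbs := by
      rw [hfact, Int.natAbs_mul, Int.natAbs_pow]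
    have hm'0 : m'.natAbs ≠ 0 := by omega
    have homega : pvOmega m.natAbs = k + pvOmega m'.natAbs := by
      rw [hmabs, pvOmega_mul (pow_ne_zero k hpr.ne_zero) hm'0,
        pvOmega_prime_pow hpr]
    rw [heq]
    refine ⟨by rw [homega]; push_cast; ring, hm', ?_, ?_⟩
    · have : m' ∣ m := ⟨i ^ k, by rw [hfact]; ring⟩
      exact Int.le_of_dvd (by omega) this
    · intro p hp hpd
      have hpm : (p : Int) ∣ m := hpd.trans ⟨i ^ k, by rw [hfact]; ring⟩
      have hip := H p hp hpm
      by_cases hpe : (p : Int) = i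
      · exact absurd (hpe ▸ hpd) hnd
      · omega
  · -- i is composite: i cannot divide m, nothing is stripped
    have hnid : ¬ i ∣ m := by
      intro hid
      have h2 : 2 ≤ i.natAbs := by omega
      have hq : (i.natAbs.minFac).Prime := Nat.minFac_prime (by omega)
      have hqlt : i.natAbs.minFac < i.natAbs := by
        have hle : i.natAbs.minFac ≤ i.natAbs := Nat.le_of_dvd (by omega) (Nat.minFac_dvd _)
        rcases lt_or_eq_of_le hle with h | h
        · exact h
        · exact absurd (h ▸ hq) hpr
      have hdm : (i.natAbs.minFac : Int) ∣ m := by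
        refine dvd_trans ?_ hid
        have : (i.natAbs.minFac : Int) ∣ (i.natAbs : Int) :=
          Int.natCast_dvd_natCast.2 (Nat.minFac_dvd _)
        rwa [Int.natAbs_of_nonneg (by omega : (0:Int) ≤ i)] at this
      have := H _ hq hdm
      omega
    have hk0 : k = 0 := by
      rcases Nat.eq_zero_or_pos k with h | h
      · exact h
      · exfalso
        exact hnid (dvd_trans (dvd_pow_self i (by omega)) ⟨m', hfact⟩)
    subst hk0
    have hmm : m' = m := by rw [hfact]; ring
    rw [heq, hmm]
    refine ⟨by push_cast; ring, hm, le_refl m, ?_⟩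
    intro p hp hpd
    have hip := H p hp hpd
    by_cases hpe : (p : Int) = i
    · exfalso
      have : p = i.natAbs := by omega
      exact hpr (this ▸ hp)
    · omega

-- A's for-loop over range(2, s+1)
lemma pvNPrimesLoop_spec (s : Int) : ∀ (t : Nat) (i count m : Int), 2 ≤ i → 1 ≤ m →
    (s + 1 - i).toNat = t →
    (∀ p : ℕ, p.Prime → (p : Int) ∣ m → i ≤ (p : Int)) →
    (let st := (PySem.List.pyRange i (s+1) 1).foldl
        (fun (st : Int × Int) i => pvStripA i st.1 st.2 (st.2.natAbs + 1)) (count, m);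
     st.1 + (pvOmega st.2.natAbs : Int) = count + (pvOmega m.natAbs : Int) ∧
     1 ≤ st.2 ∧ st.2 ≤ m ∧
     (∀ p : ℕ, p.Prime → (p : Int) ∣ st.2 → s + 1 ≤ (p : Int))) := by
  intro t
  induction t with
  | zero =>
    intro i count m hi hm ht H
    have hnil : PySem.List.pyRange i (s+1) 1 = [] := PySem.List.pyRange_one_eq_nil (by omega)
    simp only [hnil, List.foldl_nil]
    exact ⟨by simp, hm, le_refl m, fun p hp hpd => le_trans (by omega : s + 1 ≤ i) (H p hp hpd)⟩
  | succ t' ih =>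
    intro i count m hi hm ht H
    have hcons : PySem.List.pyRange i (s+1) 1 = i :: PySem.List.pyRange (i+1) (s+1) 1 :=
      PySem.List.pyRange_one_cons (by omega)
    simp only [hcons, List.foldl_cons]
    obtain ⟨ho, h1, hle, hb⟩ := pvStripA_omega i count m (m.natAbs + 1) hi hm (by omega) H
    obtain ⟨ho2, h12, hle2, hb2⟩ := ih (i+1) (pvStripA i count m (m.natAbs + 1)).1
      (pvStripA i count m (m.natAbs + 1)).2 (by omega) h1 (by omega) hb
    simp only [Prod.mk.eta] at ho2 h12 hle2 hb2
    exact ⟨by omega, h12, by omega, hb2⟩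

lemma pvNPrimes_eq (m : Int) (hm : 0 ≤ m) : pvNPrimes m = (pvOmega m.natAbs : Int) := by
  by_cases h0 : m = 0
  · subst h0
    have : pvNPrimes 0 = 0 := by decide
    rw [this]
    simp [pvOmega, Nat.primeFactorsList_zero]
  have hm1 : 1 ≤ m := by omega
  obtain ⟨ho, h1, hle, hb⟩ := pvNPrimesLoop_spec ((Nat.sqrt m.toNat : Int))
    (((Nat.sqrt m.toNat : Int) + 1 - 2)).toNat 2 0 m (le_refl 2) hm1 rfl
    (fun p hp _ => by exact_mod_cast hp.two_le)
  simp only [pvNPrimes]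
  rw [pvSqrtInt_eq m hm]
  set s : Int := (Nat.sqrt m.toNat : Int) with hs
  set st := (PySem.List.pyRange 2 (s+1) 1).foldl
      (fun (st : Int × Int) i => pvStripA i st.1 st.2 (st.2.natAbs + 1)) ((0:Int), m) with hst
  by_cases hgt : st.2 > 1
  · rw [if_pos hgt]
    have hq2 : 2 ≤ st.2.natAbs := by omega
    have hqprime : (st.2.natAbs).Prime := by
      apply pv_prime_of_sq_factors _ hq2
      intro p hp hpd
      have hpd' : (p : Int) ∣ st.2 := by
        have : (p : Int) ∣ (st.2.natAbs : Int) := Int.natCast_dvd_natCast.2 hpd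
        rwa [Int.natAbs_of_nonneg (by omega)] at this
      have hbp := hb p hp hpd'
      have hsucc : m.toNat < (Nat.sqrt m.toNat + 1) ^ 2 := Nat.lt_succ_sqrt' m.toNat
      have hple : st.2.natAbs ≤ m.toNat := by omega
      have hps : Nat.sqrt m.toNat + 1 ≤ p := by omega
      calc st.2.natAbs ≤ m.toNat := hple
        _ < (Nat.sqrt m.toNat + 1) ^ 2 := hsucc
        _ ≤ p ^ 2 := Nat.pow_le_pow_left hps 2
        _ = p * p := by ring
    have : pvOmega st.2.natAbs = 1 := pvOmega_prime hqprime
    omega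
  · rw [if_neg hgt]
    have h2 : st.2 = 1 := by omega
    rw [h2] at ho
    simp only [Int.natAbs_one, pvOmega, Nat.primeFactorsList_one, List.length_nil] at ho
    simpa [pvOmega] using ho

-- B's while i*i <= n loop
lemma pvOmegaLoop_spec : ∀ (fuel : Nat) (total n i : Int), 2 ≤ i → 1 ≤ n →
    (∀ p : ℕ, p.Prime → (p : Int) ∣ n → i ≤ (p : Int)) →
    (n + 2 - i).toNat < fuel →
    pvOmegaLoop total n i fuel = total + (pvOmega n.natAbs : Int) := by
  intro fuel
  induction fuel with
  | zero => intro total n i hi hn _ hf; omega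
  | succ f ih =>
    intro total n i hi hn H hf
    simp only [pvOmegaLoop]
    by_cases hcond : i * i ≤ n
    · simp only [hcond, if_true]
      rw [pvStripB_eq_A]
      obtain ⟨ho, h1, hle, hb⟩ := pvStripA_omega i total n (n.natAbs + 1) hi hn (by omega) H
      have hin : i ≤ n := by nlinarith
      rw [ih _ _ _ (by omega) h1 hb (by omega)]
      omega
    · simp only [hcond, if_false]
      by_cases hgt : n > 1
      · simp only [hgt, if_true]
        have hq2 : 2 ≤ n.natAbs := by omega
        have hqprime : (n.natAbs).Prime := by
          apply pv_prime_of_sq_factors _ hq2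
          intro p hp hpd
          have hpd' : (p : Int) ∣ n := by
            have : (p : Int) ∣ (n.natAbs : Int) := Int.natCast_dvd_natCast.2 hpd
            rwa [Int.natAbs_of_nonneg (by omega)] at this
          have hip := H p hp hpd'
          have : n < (p : Int) * (p : Int) := by nlinarith
          exact_mod_cast (by omega : (n.natAbs : Int) < ((p * p : ℕ) : Int))
        rw [pvOmega_prime hqprime]
        omega
      · simp only [hgt, if_false]
        have : n = 1 := by omega
        subst this
        simp [pvOmega, Nat.primeFactorsList_one]

-- Ω of a fold-product of nonzero ints
lemma pvOmega_foldl_mul : ∀ (l : List Int) (c : Int), c ≠ 0 → (∀ x ∈ l, x ≠ 0) →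
    pvOmega ((l.foldl (· * ·) c).natAbs)
      = pvOmega c.natAbs + (l.map (fun j => pvOmega j.natAbs)).sum := by
  intro l
  induction l with
  | nil => intro c _ _; simp
  | cons x l ih =>
    intro c hc hl
    have hx : x ≠ 0 := hl x List.mem_cons_self
    have hcx : c * x ≠ 0 := mul_ne_zero hc hx
    simp only [List.foldl_cons, List.map_cons, List.sum_cons]
    rw [ih (c * x) hcx (fun y hy => hl y (List.mem_cons_of_mem x hy)),
      Int.natAbs_mul, pvOmega_mul (by simpa using hc) (by simpa using hx)]
    ring

-- sign facts about the range product
lemma pv_foldl_mul_pos : ∀ (l : List Int) (c : Int), 1 ≤ c → (∀ x ∈ l, 1 ≤ x) →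
    1 ≤ l.foldl (· * ·) c := by
  intro l
  induction l with
  | nil => intro c hc _; simpa using hc
  | cons x l ih =>
    intro c hc hl
    have hx : 1 ≤ x := hl x List.mem_cons_self
    simp only [List.foldl_cons]
    exact ih (c * x) (by nlinarith) (fun y hy => hl y (List.mem_cons_of_mem x hy))

lemma pv_negProd : ∀ (t : Nat) (a b c : Int), 1 ≤ c → b < 0 → a ≤ b + 1 →
    (b + 1 - a).toNat = t → t % 2 = 0 →
    1 ≤ (PySem.List.pyRange a (b+1) 1).foldl (· * ·) c := by
  intro t
  induction t using Nat.strong_induction_on with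
  | _ t ih =>
    intro a b c hc hb hab ht hpar
    rcases Nat.eq_zero_or_pos t with h0 | hpos
    · subst h0
      have : PySem.List.pyRange a (b+1) 1 = [] := PySem.List.pyRange_one_eq_nil (by omega)
      simpa [this] using hc
    · have ht2 : 2 ≤ t := by omega
      have ha1 : a < b + 1 := by omega
      have ha2 : a + 1 < b + 1 := by omega
      rw [PySem.List.pyRange_one_cons ha1, PySem.List.pyRange_one_cons ha2]
      simp only [List.foldl_cons]
      have haneg : a ≤ -2 := by omega
      have h2 : 2 ≤ a * (a + 1) := by
        nlinarith [mul_le_mul (show (2:Int) ≤ -a by omega) (show (1:Int) ≤ -(a+1) by omega)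
          (by omega : (0:Int) ≤ 1) (by omega : (0:Int) ≤ -a)]
      have h3 : c * 2 ≤ c * (a * (a + 1)) := mul_le_mul_of_nonneg_left h2 (by omega)
      have hstep : 1 ≤ c * a * (a + 1) := by nlinarith
      exact ih (t - 2) (by omega) (a + 1 + 1) b (c * a * (a + 1)) hstep hb (by omega)
        (by omega) (by omega)

lemma pv_foldl_zero : ∀ (l : List Int), l.foldl (· * ·) (0:Int) = 0 := by
  intro l
  induction l with
  | nil => rfl
  | cons x l ih => simpa using ih

lemma pv_foldl_mul_zero : ∀ (l : List Int) , (0:Int) ∈ l → ∀ c, l.foldl (· * ·) c = 0 := by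
  intro l
  induction l with
  | nil => intro h; exact absurd h (List.not_mem_nil)
  | cons x l ih =>
    intro h c
    rcases List.mem_cons.1 h with h | h
    · simp only [List.foldl_cons, ← h, mul_zero]
      exact pv_foldl_zero l
    · exact ih h (c * x)

lemma pv_alt_step (l : List Int) (hx0 : ∀ x ∈ l, x ≠ 0) :
    l.foldl (fun total j => pvOmegaLoop total |j| 2 (j.natAbs + 2)) 0
      = (l.map (fun j => (pvOmega j.natAbs : Int))).sum := by
  have hcong : ∀ (acc : Int) (x : Int), x ∈ l →
      pvOmegaLoop acc |x| 2 (x.natAbs + 2) = acc + (pvOmega x.natAbs : Int) := by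
    intro acc x hx
    have hxne := hx0 x hx
    have habs : (1:Int) ≤ |x| := by
      have := abs_pos.2 hxne; omega
    have hfu : (|x| + 2 - 2).toNat < x.natAbs + 2 := by
      rw [Int.abs_eq_natAbs]; omega
    rw [pvOmegaLoop_spec (x.natAbs + 2) acc |x| 2 le_rfl habs
      (fun p hp _ => by exact_mod_cast hp.two_le) hfu, Int.natAbs_abs]
  calc l.foldl (fun total j => pvOmegaLoop total |j| 2 (j.natAbs + 2)) 0
      = l.foldl (fun acc x => acc + (pvOmega x.natAbs : Int)) 0 :=
        PySem.List.foldl_congr_mem l _ _ 0 hcong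
    _ = 0 + (l.map (fun j => (pvOmega j.natAbs : Int))).sum :=
        PySem.List.foldl_add l (fun j : Int => (pvOmega j.natAbs : Int)) 0
    _ = (l.map (fun j => (pvOmega j.natAbs : Int))).sum := by rw [zero_add]

lemma pv_main_pos (a b : Int) (hx0 : ∀ x ∈ PySem.List.pyRange a (b+1) 1, x ≠ 0)
    (hprod : 1 ≤ (PySem.List.pyRange a (b+1) 1).foldl (· * ·) 1) :
    pvNPrimes ((PySem.List.pyRange a (b+1) 1).foldl (· * ·) 1)
      = (PySem.List.pyRange a (b+1) 1).foldl (fun total j => pvOmegaLoop total |j| 2 (j.natAbs + 2)) 0 := by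
  set l := PySem.List.pyRange a (b+1) 1 with hl
  rw [pvNPrimes_eq _ (by omega), pvOmega_foldl_mul l 1 one_ne_zero hx0, pv_alt_step l hx0]
  have h1 : pvOmega (1:Int).natAbs = 0 := by simp [pvOmega, Nat.primeFactorsList_one]
  rw [h1]
  simp [Nat.cast_list_sum, List.map_map, Function.comp_def]

-- ===== VERDICT (by name: the statement is the Claim_ definition above) =====
theorem sumOfPowers_spec : Claim_equal_sumOfPowers := by
  unfold Claim_equal_sumOfPowers
  intro a b _ hpre
  unfold Pre_sumOfPowers at hpre
  unfold Spec_sumOfPowers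
  simp only [sumOfPowers, sumOfPowers_alt]
  by_cases hz : a ≤ 0 ∧ 0 ≤ b
  · rw [if_pos hz]
    have h0mem : (0:Int) ∈ PySem.List.pyRange a (b+1) 1 := by
      rw [PySem.List.mem_pyRange_one]; omega
    rw [pv_foldl_mul_zero _ h0mem 1]
    decide
  · rw [if_neg hz]
    by_cases hab : a ≤ b
    · have hx0 : ∀ x ∈ PySem.List.pyRange a (b+1) 1, x ≠ 0 := by
        intro x hx
        rw [PySem.List.mem_pyRange_one] at hx
        omega
      have hprod : 1 ≤ (PySem.List.pyRange a (b+1) 1).foldl (· * ·) 1 := by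
        rcases (by omega : 1 ≤ a ∨ b ≤ -1) with h | h
        · refine pv_foldl_mul_pos _ 1 le_rfl ?_
          intro x hx
          rw [PySem.List.mem_pyRange_one] at hx
          omega
        · exact pv_negProd (b+1-a).toNat a b 1 le_rfl (by omega) (by omega) rfl (by omega)
      exact pv_main_pos a b hx0 hprod
    · have hnil : PySem.List.pyRange a (b+1) 1 = [] := PySem.List.pyRange_one_eq_nil (by omega)
      rw [hnil]
      decide
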